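-- pv_equiv track=rewrite | github.com/sierra-research/mu-bench | scripts/fix_alignment.py | build_rename_map
-- ===== SOURCE A (Python) =====
-- def build_rename_map(n_legacy, dropped_indices):
--     """
--     Build mapping: old_index -> new_index (or None for deleted).
--     Non-dropped files get sequential indices closing the gaps.
--     """
--     rename = {}
--     new_idx = 0
--     dropped_set = set(dropped_indices)
--     for old_idx in range(n_legacy):
--         if old_idx in dropped_set:
--             rename[old_idx] = None
--         else:
--             rename[old_idx] = new_idx
--             new_idx += 1
--     return rename
-- ===== SOURCE B (Python) =====
-- def build_rename_map(n_legacy, dropped_indices):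
--     """
--     Build mapping: old_index -> new_index (or None for deleted).
--     Rank-based: sort the distinct in-range dropped indices once; each old
--     index's new position is computed independently by a binary-search rank
--     (new = old - number_of_dropped_below(old)), with no running counter.
--     """
--     ds = sorted({d for d in dropped_indices if 0 <= d < n_legacy})
--     rename = {}
--     for i in range(n_legacy):
--         lo, hi = 0, len(ds)
--         while lo < hi:
--             mid = (lo + hi) // 2
--             if ds[mid] < i:
--                 lo = mid + 1
--             else:
--                 hi = mid
--         if lo < len(ds) and ds[lo] == i:
--             rename[i] = None
--         else:
--             rename[i] = i - lo
--     return rename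
-- ===== Notes on version B (the rewrite author's own statement) =====
-- stated objective: alternative
-- what changed: Replaces A's single pass carrying a running counter with a rank-based algorithm: sort the distinct in-range dropped indices once, then compute each index's new position independently as old - rank(old) where rank is obtained by binary search (which also decides membership), so no sequential accumulator exists.
import Mathlib
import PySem

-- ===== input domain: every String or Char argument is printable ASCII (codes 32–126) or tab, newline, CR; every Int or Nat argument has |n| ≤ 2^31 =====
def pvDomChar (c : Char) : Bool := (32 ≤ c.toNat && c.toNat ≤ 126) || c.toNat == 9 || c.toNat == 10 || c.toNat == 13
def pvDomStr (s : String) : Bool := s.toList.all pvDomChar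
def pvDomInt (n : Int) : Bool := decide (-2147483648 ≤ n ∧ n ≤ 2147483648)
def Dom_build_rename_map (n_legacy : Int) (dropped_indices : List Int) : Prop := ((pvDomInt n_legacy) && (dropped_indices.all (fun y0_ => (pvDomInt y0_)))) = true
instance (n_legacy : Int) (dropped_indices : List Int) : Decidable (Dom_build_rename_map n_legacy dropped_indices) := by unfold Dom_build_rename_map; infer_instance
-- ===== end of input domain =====

-- B replaces A's running-counter pass with a rank-based algorithm: sort the distinct
-- in-range dropped indices, then each new position is old - (binary-search rank of old).


-- ===== PORT A =====
def build_rename_map (n_legacy : Int) (dropped_indices : List Int) : List (Int × Option Int) :=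
  let dropped_set : PySem.Set Int := PySem.Set.ofList dropped_indices
  let res :=
    (PySem.List.pyRange 0 n_legacy 1).foldl
      (fun (st : PySem.Dict Int (Option Int) × Int) old_idx =>
        if dropped_set.contains old_idx then (st.1.insert old_idx none, st.2)
        else (st.1.insert old_idx (some st.2), st.2 + 1))
      (PySem.Dict.empty, 0)
  res.1.items

-- ===== PORT B =====
-- the while-loop binary search of Source B (ds[mid] is always in range there)
def pvBS (ds : List Int) (x : Int) (lo hi : Int) : Int :=
  if h : lo < hi then
    let mid := PySem.Int.floordiv (lo + hi) 2
    if PySem.List.pyGetD ds mid 0 < x then pvBS ds x (mid + 1) hi else pvBS ds x lo mid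
  else lo
termination_by (hi - lo).toNat
decreasing_by
  · have := PySem.Int.floordiv_two_mid_bounds (lo := lo) (hi := hi) (le_of_lt h)
    omega
  · have h1 := PySem.Int.floordiv_two_mid_bounds (lo := lo) (hi := hi) (le_of_lt h)
    have h2 := PySem.Int.floordiv_mul_add_mod (lo + hi) 2
    have h3 := PySem.Int.mod_nonneg (a := lo + hi) (b := 2) (by omega)
    omega

def build_rename_map_alt (n_legacy : Int) (dropped_indices : List Int) : List (Int × Option Int) :=
  let ds := PySem.List.sorted
      (PySem.Set.ofList (dropped_indices.filter (fun d => decide (0 ≤ d) && decide (d < n_legacy))))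
      (fun x => x) false
  let rename :=
    (PySem.List.pyRange 0 n_legacy 1).foldl
      (fun (r : PySem.Dict Int (Option Int)) i =>
        let lo := pvBS ds i 0 (ds.length : Int)
        if lo < (ds.length : Int) && PySem.List.pyGetD ds lo 0 == i then r.insert i none
        else r.insert i (some (i - lo)))
      PySem.Dict.empty
  rename.items

-- ===== PRECONDITION & SPEC =====
def Spec_build_rename_map (n_legacy : Int) (dropped_indices : List Int) (out : List (Int × Option Int)) : Prop := out = build_rename_map_alt n_legacy dropped_indices
instance (n_legacy : Int) (dropped_indices : List Int) (out : List (Int × Option Int)) : Decidable (Spec_build_rename_map n_legacy dropped_indices out) := by unfold Spec_build_rename_map; infer_instance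

-- ===== CLAIM (what is proved, stated in full; the proofs are below) =====
def Claim_equal_build_rename_map : Prop := ∀ (n_legacy : Int) (dropped_indices : List Int), Dom_build_rename_map n_legacy dropped_indices → Spec_build_rename_map n_legacy dropped_indices (build_rename_map n_legacy dropped_indices)

-- ===== LEMMAS AND PROOFS =====

-- A's per-element result as a function of the remaining indices and the counter.
def pvSpecA (P : Int → Bool) : List Int → Int → List (Int × Option Int)
  | [], _ => []
  | x :: t, c => if P x then (x, none) :: pvSpecA P t c else (x, some c) :: pvSpecA P t (c + 1)

-- A's fold, with fresh distinct keys, appends exactly pvSpecA to the items.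
theorem pvA_items (P : Int → Bool) :
    ∀ (xs : List Int) (d : PySem.Dict Int (Option Int)) (c : Int),
      xs.Nodup → (∀ x ∈ xs, d.contains x = false) →
      ((xs.foldl (fun (st : PySem.Dict Int (Option Int) × Int) old_idx =>
          if P old_idx then (st.1.insert old_idx none, st.2)
          else (st.1.insert old_idx (some st.2), st.2 + 1)) (d, c)).1).items
        = d.items ++ pvSpecA P xs c := by
  intro xs
  induction xs with
  | nil => intro d c _ _; simp [pvSpecA]
  | cons x t ih =>
    intro d c hnd hf
    have hx : d.contains x = false := hf x (by simp)
    have hft : ∀ v : Option Int, ∀ y ∈ t, (d.insert x v).contains y = false := by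
      intro v y hy
      rw [PySem.Dict.contains_insert]
      have : y ≠ x := by rintro rfl; exact (List.nodup_cons.mp hnd).1 hy
      simp [this, hf y (by simp [hy])]
    have hndt := (List.nodup_cons.mp hnd).2
    simp only [List.foldl_cons, pvSpecA]
    by_cases hP : P x
    · simp only [hP, if_pos]
      rw [ih _ _ hndt (hft none), PySem.Dict.items_insert_of_not_contains _ _ hx]
      simp
    · simp only [hP, if_neg, Bool.false_eq_true, not_false_iff]
      rw [ih _ _ hndt (hft (some c)), PySem.Dict.items_insert_of_not_contains _ _ hx]
      simp

-- pvSpecA in closed form: the kept index's position in the filtered list.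
theorem pvSpecA_closed (P : Int → Bool) :
    ∀ (xs : List Int) (c : Int), xs.Nodup →
      pvSpecA P xs c
        = xs.map (fun i => (i, if P i then none
            else some (c + ((xs.filter (fun j => !P j)).idxOf i : Int)))) := by
  intro xs
  induction xs with
  | nil => intro c _; simp [pvSpecA]
  | cons x t ih =>
    intro c hnd
    have hxt : x ∉ t := (List.nodup_cons.mp hnd).1
    have hndt := (List.nodup_cons.mp hnd).2
    by_cases hP : P x
    · simp only [pvSpecA, hP, if_pos, List.map_cons, List.filter_cons, Bool.not_eq_true']
      rw [ih c hndt]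
      simp
    · simp only [pvSpecA, hP, if_neg, Bool.false_eq_true, not_false_iff,
        List.map_cons, List.filter_cons]
      rw [ih (c+1) hndt]
      simp only [Bool.not_false, if_pos]
      refine List.cons_eq_cons.mpr ⟨by simp [List.idxOf_cons_self], ?_⟩
      apply List.map_congr_left
      intro i hi
      have hne : i ≠ x := fun h => hxt (h ▸ hi)
      by_cases hPi : P i
      · simp [hPi]
      · simp only [hPi, Bool.false_eq_true, if_neg, not_false_iff]
        rw [List.idxOf_cons_ne _ (Ne.symm hne)]
        push_cast; ring_nf

-- B's fold with fresh distinct keys: items is the map of the per-key value.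
theorem pvB_items (f : Int → Option Int) :
    ∀ (xs : List Int) (d : PySem.Dict Int (Option Int)),
      xs.Nodup → (∀ x ∈ xs, d.contains x = false) →
      (xs.foldl (fun (r : PySem.Dict Int (Option Int)) i => r.insert i (f i)) d).items
        = d.items ++ xs.map (fun i => (i, f i)) := by
  intro xs
  induction xs with
  | nil => intro d _ _; simp
  | cons x t ih =>
    intro d hnd hf
    have hx : d.contains x = false := hf x (by simp)
    have hft : ∀ y ∈ t, (d.insert x (f x)).contains y = false := by
      intro y hy
      rw [PySem.Dict.contains_insert]
      have : y ≠ x := by rintro rfl; exact (List.nodup_cons.mp hnd).1 hy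
      simp [this, hf y (by simp [hy])]
    simp only [List.foldl_cons, List.map_cons]
    rw [ih _ (List.nodup_cons.mp hnd).2 hft, PySem.Dict.items_insert_of_not_contains _ _ hx]
    simp

-- In a strictly increasing list, position j holds a value < x iff j is below the rank of x.
theorem pvRank_iff (x : Int) :
    ∀ (ds : List Int), ds.Pairwise (· < ·) → ∀ j : Nat, (hj : j < ds.length) →
      (ds[j] < x ↔ (j : Int) < ((ds.filter (fun d => decide (d < x))).length : Int)) := by
  intro ds
  induction ds with
  | nil => intro _ j hj; simp at hj
  | cons a t ih =>
    intro hp j hj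
    have hpa := (List.pairwise_cons.mp hp).1
    have hpt := (List.pairwise_cons.mp hp).2
    by_cases hax : a < x
    · simp only [List.filter_cons, hax, decide_true, if_pos, List.length_cons]
      cases j with
      | zero => simpa using hax
      | succ k =>
        have hk : k < t.length := by simpa using hj
        have := ih hpt k hk
        simp only [List.getElem_cons_succ]
        rw [this]
        push_cast; omega
    · have hft : t.filter (fun d => decide (d < x)) = [] := by
        apply List.filter_eq_nil_iff.mpr
        intro d hd
        have : a < d := hpa d hd
        simp; omega
      simp only [List.filter_cons, hax, decide_false, if_neg, Bool.false_eq_true,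
        not_false_iff, hft, List.length_nil]
      cases j with
      | zero => simpa using hax
      | succ k =>
        have hk : k < t.length := by simpa using hj
        have : a < t[k] := hpa _ (List.getElem_mem hk)
        simp only [List.getElem_cons_succ]
        constructor
        · intro h; omega
        · intro h; exact absurd h (by push_cast; omega)


theorem pvBS_inv (ds : List Int) (x : Int) (hs : ds.Pairwise (· < ·)) :
    ∀ (m : Nat) (lo hi : Int), (hi - lo).toNat = m → 0 ≤ lo →
      lo ≤ ((ds.filter (fun d => decide (d < x))).length : Int) →
      ((ds.filter (fun d => decide (d < x))).length : Int) ≤ hi → hi ≤ (ds.length : Int) →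
      pvBS ds x lo hi = ((ds.filter (fun d => decide (d < x))).length : Int) := by
  intro m
  induction m using Nat.strong_induction_on with
  | _ m ih =>
    intro lo hi hm h0 hlo hhi hlen
    rw [pvBS]
    set cnt := ((ds.filter (fun d => decide (d < x))).length : Int)
    by_cases h : lo < hi
    · simp only [h, dif_pos]
      have hmb := PySem.Int.floordiv_two_mid_bounds (lo := lo) (hi := hi) (le_of_lt h)
      have h2 := PySem.Int.floordiv_mul_add_mod (lo + hi) 2
      have h3 := PySem.Int.mod_nonneg (a := lo + hi) (b := 2) (by omega)
      set mid := PySem.Int.floordiv (lo + hi) 2 with hmid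
      have hmidlt : mid < hi := by omega
      have hmidlen : mid < (ds.length : Int) := by omega
      have hget : PySem.List.pyGetD ds mid 0 = ds[mid.toNat]'(by omega) :=
        PySem.List.pyGetD_eq_getElem ds 0 (by omega) (by omega)
      have hrank := pvRank_iff x ds hs mid.toNat (by omega)
      by_cases hc : PySem.List.pyGetD ds mid 0 < x
      · simp only [hc, if_pos]
        have : (mid.toNat : Int) < cnt := hrank.mp (by rw [← hget]; exact hc)
        exact ih ((hi - (mid + 1)).toNat) (by omega) (mid + 1) hi rfl (by omega) (by omega) hhi hlen
      · simp only [hc, if_neg, not_false_iff]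
        have : ¬ ((mid.toNat : Int) < cnt) := fun hlt => hc (by rw [hget]; exact hrank.mpr hlt)
        exact ih ((mid - lo).toNat) (by omega) lo mid rfl h0 hlo (by omega) (by omega)
    · simp only [h, dif_neg, not_false_iff]
      omega

theorem pvBS_eq_rank (ds : List Int) (x : Int) (hs : ds.Pairwise (· < ·)) :
    pvBS ds x 0 (ds.length : Int) = ((ds.filter (fun d => decide (d < x))).length : Int) := by
  have hle : (ds.filter (fun d => decide (d < x))).length ≤ ds.length := List.length_filter_le _ _
  exact pvBS_inv ds x hs _ 0 (ds.length : Int) rfl le_rfl (by positivity) (by exact_mod_cast hle) le_rfl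

theorem pvRank_mem (ds : List Int) (x : Int) (hs : ds.Pairwise (· < ·)) :
    (((ds.filter (fun d => decide (d < x))).length : Int) < (ds.length : Int)
      ∧ PySem.List.pyGetD ds ((ds.filter (fun d => decide (d < x))).length : Int) 0 = x)
      ↔ x ∈ ds := by
  set c := (ds.filter (fun d => decide (d < x))).length with hc
  constructor
  · rintro ⟨hlt, hget⟩
    have hcl : c < ds.length := by exact_mod_cast hlt
    rw [PySem.List.pyGetD_eq_getElem ds 0 (by positivity) (by exact_mod_cast hlt)] at hget
    simp only [Int.toNat_natCast] at hget
    exact hget ▸ List.getElem_mem hcl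
  · intro hx
    obtain ⟨j, hj, hjx⟩ := List.mem_iff_getElem.mp hx
    have hmono := List.pairwise_iff_getElem.mp hs
    have hcj : c = j := by
      have h1 : ¬ ((j : Int) < (c : Int)) := by
        intro h
        have := (pvRank_iff x ds hs j hj).mpr h
        omega
      have h2 : ∀ j' : Nat, j' < j → (j' : Int) < (c : Int) := by
        intro j' hj'
        exact (pvRank_iff x ds hs j' (by omega)).mp (by
          have := hmono j' j (by omega) hj hj'
          omega)
      by_cases hj0 : j = 0
      · omega
      · have := h2 (j - 1) (by omega); omega
    subst hcj
    refine ⟨by exact_mod_cast hj, ?_⟩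
    rw [PySem.List.pyGetD_eq_getElem ds 0 (by positivity) (by exact_mod_cast hj)]
    simpa using hjx

theorem pvIdxOf_pairwise_lt (x : Int) :
    ∀ (l : List Int), l.Pairwise (· < ·) → x ∈ l →
      l.idxOf x = (l.filter (fun d => decide (d < x))).length := by
  intro l
  induction l with
  | nil => intro _ h; simp at h
  | cons a t ih =>
    intro hp hx
    have hpa := (List.pairwise_cons.mp hp).1
    have hpt := (List.pairwise_cons.mp hp).2
    by_cases hax : x = a
    · subst hax
      have hft : t.filter (fun d => decide (d < x)) = [] := by
        apply List.filter_eq_nil_iff.mpr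
        intro d hd
        have := hpa d hd; simp; omega
      simp [List.idxOf_cons_self, hft]
    · have hxt : x ∈ t := by rcases List.mem_cons.mp hx with h | h; exact absurd h hax; exact h
      have hax' : a < x := hpa x hxt
      rw [List.idxOf_cons_ne _ (Ne.symm hax)]
      simp only [List.filter_cons, hax', decide_true, if_pos, List.length_cons]
      rw [ih hpt hxt]

-- ===== VERDICT (by name: the statement is the Claim_ definition above) =====
theorem build_rename_map_spec : Claim_equal_build_rename_map := by
  intro n dropped _
  unfold Spec_build_rename_map build_rename_map build_rename_map_alt
  set P : Int → Bool := fun i => (PySem.Set.ofList dropped).contains i with hP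
  set xs := PySem.List.pyRange 0 n 1 with hxs
  have hnd : xs.Nodup := PySem.List.nodup_pyRange_one 0 n
  have hemp : ∀ x ∈ xs, (PySem.Dict.empty (κ := Int) (ν := Option Int)).contains x = false := by
    intro x _; simp
  set ds := PySem.List.sorted
      (PySem.Set.ofList (dropped.filter (fun d => decide (0 ≤ d) && decide (d < n))))
      (fun x => x) false with hdsdef
  have hds_pw : ds.Pairwise (· < ·) := PySem.List.sorted_ofList_pairwise_lt _
  have hds_nd : ds.Nodup := hds_pw.imp (fun h => ne_of_lt h)
  have hds_mem : ∀ y : Int, y ∈ ds ↔ (P y = true ∧ 0 ≤ y ∧ y < n) := by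
    intro y
    rw [hdsdef, PySem.List.mem_sorted, PySem.Set.mem_ofList, List.mem_filter]
    simp [hP, PySem.Set.mem_ofList]
  rw [pvA_items P xs PySem.Dict.empty 0 hnd hemp, pvSpecA_closed P xs 0 hnd]
  have hB : (xs.foldl
      (fun (r : PySem.Dict Int (Option Int)) i =>
        if decide (pvBS ds i 0 (ds.length : Int) < (ds.length : Int))
            && (PySem.List.pyGetD ds (pvBS ds i 0 (ds.length : Int)) 0 == i) then r.insert i none
        else r.insert i (some (i - pvBS ds i 0 (ds.length : Int))))
      PySem.Dict.empty).items
      = xs.map (fun i => (i,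
          if decide (pvBS ds i 0 (ds.length : Int) < (ds.length : Int))
              && (PySem.List.pyGetD ds (pvBS ds i 0 (ds.length : Int)) 0 == i) then none
          else some (i - pvBS ds i 0 (ds.length : Int)))) := by
    have hfun : (fun (r : PySem.Dict Int (Option Int)) i =>
        if decide (pvBS ds i 0 (ds.length : Int) < (ds.length : Int))
            && (PySem.List.pyGetD ds (pvBS ds i 0 (ds.length : Int)) 0 == i) then r.insert i none
        else r.insert i (some (i - pvBS ds i 0 (ds.length : Int))))
        = (fun (r : PySem.Dict Int (Option Int)) i => r.insert i
            (if decide (pvBS ds i 0 (ds.length : Int) < (ds.length : Int))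
                && (PySem.List.pyGetD ds (pvBS ds i 0 (ds.length : Int)) 0 == i) then none
             else some (i - pvBS ds i 0 (ds.length : Int)))) := by
      funext r i
      by_cases h : (decide (pvBS ds i 0 (ds.length : Int) < (ds.length : Int))
          && (PySem.List.pyGetD ds (pvBS ds i 0 (ds.length : Int)) 0 == i)) = true
      · simp [h]
      · simp [h]
    rw [hfun, pvB_items _ xs PySem.Dict.empty hnd hemp,
        show (PySem.Dict.empty : PySem.Dict Int (Option Int)).items = [] from rfl, List.nil_append]
  rw [show (PySem.Dict.empty : PySem.Dict Int (Option Int)).items = [] from rfl, List.nil_append]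
  refine Eq.trans ?_ hB.symm
  apply List.map_congr_left
  intro i hi
  have hib : 0 ≤ i ∧ i < n := PySem.List.mem_pyRange_one.mp (hxs ▸ hi)
  have hlo : pvBS ds i 0 (ds.length : Int)
      = ((ds.filter (fun d => decide (d < i))).length : Int) := pvBS_eq_rank ds i hds_pw
  have hcond : (decide (pvBS ds i 0 (ds.length : Int) < (ds.length : Int))
      && (PySem.List.pyGetD ds (pvBS ds i 0 (ds.length : Int)) 0 == i)) = P i := by
    rcases Bool.eq_false_or_eq_true (P i) with hPi | hPi
    · rw [hPi]
      have hmem : i ∈ ds := (hds_mem i).mpr ⟨hPi, hib.1, hib.2⟩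
      obtain ⟨h1, h2⟩ := (pvRank_mem ds i hds_pw).mpr hmem
      rw [Bool.and_eq_true]
      exact ⟨by rw [hlo]; simpa using h1, by rw [hlo, h2]; exact beq_self_eq_true i⟩
    · rw [hPi]
      rw [Bool.and_eq_false_iff]
      by_cases hl : pvBS ds i 0 (ds.length : Int) < (ds.length : Int)
      · right
        rw [beq_eq_false_iff_ne]
        intro hgi
        have : i ∈ ds := (pvRank_mem ds i hds_pw).mp ⟨hlo ▸ hl, hlo ▸ hgi⟩
        rw [hds_mem i] at this
        rw [hPi] at this; simp at this
      · left; simpa using hl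
  rw [hcond, hlo]
  rcases Bool.eq_false_or_eq_true (P i) with hPi | hPi
  · rw [hPi]; simp
  · -- kept index: idxOf in the filtered range = i - rank
    rw [hPi]
    simp only [Bool.false_eq_true, if_neg, not_false_iff]
    refine congrArg _ (congrArg _ ?_)
    set kept := xs.filter (fun j => !P j) with hkept
    have hkept_pw : kept.Pairwise (· < ·) := (PySem.List.pairwise_lt_pyRange_one 0 n).filter _
    have hik : i ∈ kept := List.mem_filter.mpr ⟨hi, by simp [hPi]⟩
    rw [pvIdxOf_pairwise_lt i kept hkept_pw hik]
    -- the range below i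
    have hR : xs.filter (fun j => decide (j < i)) = PySem.List.pyRange 0 i 1 := by
      rw [hxs, PySem.List.pyRange_one_append 0 i n hib.1 (le_of_lt hib.2), List.filter_append,
          List.filter_eq_self.mpr (by intro a ha; simpa using (PySem.List.mem_pyRange_one.mp ha).2),
          List.filter_eq_nil_iff.mpr (by intro a ha; simpa using (PySem.List.mem_pyRange_one.mp ha).1),
          List.append_nil]
    have h1 : kept.filter (fun d => decide (d < i))
        = (PySem.List.pyRange 0 i 1).filter (fun j => !P j) := by
      rw [hkept, List.filter_filter, ← hR, List.filter_filter]
      exact List.filter_congr (fun a _ => Bool.and_comm _ _)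
    have h2 : (ds.filter (fun d => decide (d < i))).length
        = ((PySem.List.pyRange 0 i 1).filter P).length := by
      apply List.Perm.length_eq
      rw [List.perm_ext_iff_of_nodup (hds_nd.filter _)
        ((PySem.List.nodup_pyRange_one 0 i).filter _)]
      intro y
      rw [List.mem_filter, List.mem_filter, hds_mem y, PySem.List.mem_pyRange_one]
      constructor
      · rintro ⟨⟨hp, h0, _⟩, hlt⟩; exact ⟨⟨h0, by simpa using hlt⟩, hp⟩
      · rintro ⟨⟨h0, hlt⟩, hp⟩; exact ⟨⟨hp, h0, by omega⟩, by simpa using hlt⟩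
    have h3 := List.length_eq_length_filter_add (l := PySem.List.pyRange 0 i 1) P
    have h4 : (PySem.List.pyRange 0 i 1).length = (i - 0).toNat :=
      PySem.List.length_pyRange_one 0 i
    have h5 : ((PySem.List.pyRange 0 i 1).filter (fun j => !P j)).length
        + ((PySem.List.pyRange 0 i 1).filter P).length = i.toNat := by omega
    rw [h1, h2]
    omega
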